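-- pv_equiv track=rewrite | github.com/ansible-collections/community.general | lib/ansible/_internal/_errors/_utils.py | _dedupe_and_concat_message_chain
-- ===== SOURCE A (Python) =====
-- def _dedupe_and_concat_message_chain(message_parts: list[str]) -> str:
--     message_parts = list(reversed(message_parts))
--
--     message = message_parts.pop(0)
--
--     for message_part in message_parts:
--         # avoid duplicate messages where the cause was already concatenated to the exception message
--         if message_part.endswith(message):
--             message = message_part
--         else:
--             message = concat_message(message_part, message)
--
--     return message
--
-- def concat_message(left: str, right: str) -> str:
--     """Normalize `left` by removing trailing punctuation and spaces before appending new punctuation and `right`."""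
--     return f'{left.rstrip(". ")}: {right}'
-- ===== SOURCE B (Python) =====
-- def _dedupe_and_concat_message_chain(message_parts: list[str]) -> str:
--     # Divide and conquer via the fold-fusion law: resolving a chain L + R is
--     # the same as resolving R to a single message and then resolving L + [that
--     # message], so split in the middle and recurse (depth O(log n)).
--     first = message_parts[0]
--     if len(message_parts) == 1:
--         return first
--     if len(message_parts) == 2:
--         second = message_parts[1]
--         return first if first.endswith(second) else concat_message(first, second)
--     mid = len(message_parts) // 2
--     right = _dedupe_and_concat_message_chain(message_parts[mid:])
--     return _dedupe_and_concat_message_chain(message_parts[:mid] + [right])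
--
--
-- def concat_message(left: str, right: str) -> str:
--     """Normalize `left` by removing trailing punctuation and spaces before appending new punctuation and `right`."""
--     return f'{left.rstrip(". ")}: {right}'
-- ===== Notes on version B (the rewrite author's own statement) =====
-- stated objective: alternative
-- what changed: Replaces A's reverse-copy/pop/mutating accumulator loop with a divide-and-conquer recursion justified by the fold-fusion law f(L+R) = f(L+[f(R)]): split the chain in the middle, resolve the right half to one message, then resolve the left half with it appended.
import Mathlib
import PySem

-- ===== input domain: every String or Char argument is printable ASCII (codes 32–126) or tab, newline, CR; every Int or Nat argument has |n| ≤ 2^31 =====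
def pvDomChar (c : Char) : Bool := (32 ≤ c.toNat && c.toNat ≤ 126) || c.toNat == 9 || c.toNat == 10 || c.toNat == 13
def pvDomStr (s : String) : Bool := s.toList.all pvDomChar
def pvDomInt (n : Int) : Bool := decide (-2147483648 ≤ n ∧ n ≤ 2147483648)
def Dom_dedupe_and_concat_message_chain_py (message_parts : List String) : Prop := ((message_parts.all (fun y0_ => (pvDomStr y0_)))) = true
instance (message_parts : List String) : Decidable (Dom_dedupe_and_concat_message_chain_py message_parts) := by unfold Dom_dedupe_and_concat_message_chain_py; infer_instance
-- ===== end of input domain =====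

-- B replaces A's reverse-copy/pop/mutating loop with a divide-and-conquer recursion
-- based on the fold-fusion law f(L++R) = f(L++[f(R)]) (alternative algorithm).

-- ===== PORT A =====
-- str.rstrip(chars): PySem has no chars-argument rstrip, hand-ported; exact on all strings
-- (drop trailing characters that occur in `chars`).
def pyRstripChars (s : String) (chars : List Char) : String :=
  String.ofList ((s.toList.reverse.dropWhile (fun c => chars.contains c)).reverse)

def concat_message_py (left right : String) : String :=
  pyRstripChars left ['.', ' '] ++ ": " ++ right

def dedupe_and_concat_message_chain_py (message_parts : List String) : String :=
  match message_parts.reverse with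
  | [] => ""   -- Python raises IndexError here; excluded by Pre_
  | m :: rest =>
    rest.foldl (fun message message_part =>
      if PySem.Str.endswith message_part message then message_part
      else concat_message_py message_part message) m

-- ===== PORT B =====
def dedupe_and_concat_message_chain_py_alt : List String → String
  | [] => ""   -- Python raises IndexError here; excluded by Pre_
  | [first] => first
  | [first, second] =>
    if PySem.Str.endswith first second then first else concat_message_py first second
  | a :: b :: c :: rest =>
    let parts := a :: b :: c :: rest
    let mid := parts.length / 2
    let right := dedupe_and_concat_message_chain_py_alt (parts.drop mid)
    dedupe_and_concat_message_chain_py_alt (parts.take mid ++ [right])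
  termination_by parts => parts.length
  decreasing_by
    · simp; omega
    · simp; omega

-- ===== PRECONDITION & SPEC =====
-- A (and B) raise IndexError on the empty list.
def Pre_dedupe_and_concat_message_chain_py (message_parts : List String) : Prop := message_parts ≠ []
instance (message_parts : List String) : Decidable (Pre_dedupe_and_concat_message_chain_py message_parts) := by unfold Pre_dedupe_and_concat_message_chain_py; infer_instance

def pvWitness_dedupe_and_concat_message_chain_py : List String := ["oops. ", "bad value"]

def Spec_dedupe_and_concat_message_chain_py (message_parts : List String) (out : String) : Prop := out = dedupe_and_concat_message_chain_py_alt message_parts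
instance (message_parts : List String) (out : String) : Decidable (Spec_dedupe_and_concat_message_chain_py message_parts out) := by unfold Spec_dedupe_and_concat_message_chain_py; infer_instance

-- ===== CLAIM (what is proved, stated in full; the proofs are below) =====
def Claim_equal_dedupe_and_concat_message_chain_py : Prop := ∀ (message_parts : List String), Dom_dedupe_and_concat_message_chain_py message_parts → Pre_dedupe_and_concat_message_chain_py message_parts → Spec_dedupe_and_concat_message_chain_py message_parts (dedupe_and_concat_message_chain_py message_parts)

-- ===== LEMMAS AND PROOFS =====
theorem A_single (x : String) : dedupe_and_concat_message_chain_py [x] = x := by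
  simp [dedupe_and_concat_message_chain_py]

theorem A_cons (x : String) (rest : List String) (h : rest ≠ []) :
    dedupe_and_concat_message_chain_py (x :: rest) =
      (if PySem.Str.endswith x (dedupe_and_concat_message_chain_py rest) then x
       else concat_message_py x (dedupe_and_concat_message_chain_py rest)) := by
  obtain ⟨m, t, hmt⟩ : ∃ m t, rest.reverse = m :: t := by
    cases hr : rest.reverse with
    | nil => exact absurd (List.reverse_eq_nil_iff.mp hr) h
    | cons m t => exact ⟨m, t, rfl⟩
  simp [dedupe_and_concat_message_chain_py, hmt, List.foldl_append]

-- fold-fusion law for A: resolving L ++ R equals resolving L ++ [resolved R]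
theorem A_fusion (L R : List String) (hL : L ≠ []) (hR : R ≠ []) :
    dedupe_and_concat_message_chain_py (L ++ R) =
      dedupe_and_concat_message_chain_py (L ++ [dedupe_and_concat_message_chain_py R]) := by
  induction L with
  | nil => exact absurd rfl hL
  | cons x L' ih =>
    by_cases hL' : L' = []
    · subst hL'
      rw [List.singleton_append, List.singleton_append,
        A_cons x R hR, A_cons x [dedupe_and_concat_message_chain_py R] (by simp), A_single]
    · rw [List.cons_append, List.cons_append,
        A_cons x (L' ++ R) (by simp [hL', hR]),
        A_cons x (L' ++ [dedupe_and_concat_message_chain_py R]) (by simp [hL']),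
        ih hL']

theorem eq_of_ne_nil (n : Nat) (l : List String) (hlen : l.length ≤ n) (h : l ≠ []) :
    dedupe_and_concat_message_chain_py l = dedupe_and_concat_message_chain_py_alt l := by
  induction n generalizing l with
  | zero => cases l with
    | nil => exact absurd rfl h
    | cons x t => simp at hlen
  | succ n ih =>
    match l with
    | [x] => simp [dedupe_and_concat_message_chain_py_alt, A_single]
    | [x, y] =>
      rw [show ([x, y] : List String) = x :: [y] from rfl, A_cons x [y] (by simp), A_single]
      simp [dedupe_and_concat_message_chain_py_alt]
    | a :: b :: c :: rest =>
      have hlen3 : (a :: b :: c :: rest).length = rest.length + 3 := by simp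
      set parts := a :: b :: c :: rest with hparts
      have hplen : parts.length = rest.length + 3 := hlen3
      set mid := parts.length / 2 with hmid
      have hmid1 : 1 ≤ mid := by omega
      have hmidlt : mid < parts.length := by omega
      have htake : parts.take mid ≠ [] := by
        intro hc
        have := congrArg List.length hc
        simp at this
        omega
      have hdrop : parts.drop mid ≠ [] := by
        intro hc
        have := congrArg List.length hc
        simp at this
        omega
      have hdlen : (parts.drop mid).length ≤ n := by simp; omega
      have htlen : (parts.take mid ++ [dedupe_and_concat_message_chain_py_alt (parts.drop mid)]).length ≤ n := by
        simp; omega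
      rw [dedupe_and_concat_message_chain_py_alt]
      rw [← ih _ htlen (by simp), ← ih _ hdlen hdrop]
      rw [← A_fusion _ _ htake hdrop, List.take_append_drop]

-- ===== VERDICT (by name: the statement is the Claim_ definition above) =====
theorem dedupe_and_concat_message_chain_py_spec : Claim_equal_dedupe_and_concat_message_chain_py := by
  intro message_parts _ hpre
  exact eq_of_ne_nil message_parts.length message_parts le_rfl hpre
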